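-- pv_equiv track=rewrite | github.com/sahilmishra780/leetcode | validParenthesesString.py | checkValidStringGreedy
-- ===== SOURCE A (Python) =====
-- def checkValidStringGreedy(s: str) -> bool:
--     """
--     There are two conditions in which the string becomes unbalanced:
--     1. During iteration we encounter too many ')'
--     2. Post iteration we have still have '(' which don't have matching ')'
--
--     Maintain two variables cmax and cmin.
--
--     cmax:
--     - counts max number of '(' that COULD be paired with ')'
--     - Here we treat each '*' as '(' to pair max number of ')'
--     - So at any point if cmax < 0 it means with all '(' and '*' treated as '('
--       we still have too many ')'. Return False in this case
--     - Takes care of condition 1 i.e. too many ')'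
--
--     cmin:
--     - counts min number of '(' that MUST be paired to make string valid.
--     - Aim of cmin is to get to 0 ASAP. So we treat each '*' as ')' and whenever
--       we see '*' or ')' we decrement cmin
--     - cmin cannot be negative. If this happens we can assume that some of the past '*' were
--       actually empty strings. Therefore everytime cmin < 0 we reset it to 0
--     - Post iteration if cmin is still > 0 that means with all the '*' as ')' and the existing
--       ')' we still have too many '('
--     - Takes care of condition 2 i.e. too many '('
--     """
--
--     cmin = cmax = 0
--     for c in s:
--         if c == '(':
--             cmax += 1
--             cmin += 1
--         elif c == ')':
--             cmin -= 1
--             cmax -= 1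
--         else: # '*'
--             cmax += 1
--             cmin -= 1
--
--         if cmin < 0:
--             cmin = 0
--         if cmax < 0:
--             return False
--
--     return cmin == 0
-- ===== SOURCE B (Python) =====
-- def _scan(chars, close):
--     bal = 0
--     for c in chars:
--         bal = bal - 1 if c == close else bal + 1
--         if bal < 0:
--             return False
--     return True
--
--
-- def checkValidStringGreedy(s: str) -> bool:
--     return _scan(s, ')') and _scan(reversed(s), '(')
-- ===== Notes on version B (the rewrite author's own statement) =====
-- stated objective: idiomatic
-- what changed: Replaces the single-pass two-counter greedy range check with the classic two-pass solution: a forward scan where wildcards count as openers and a reversed scan where wildcards count as closers, each a single counter with early exit.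
import Mathlib
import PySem

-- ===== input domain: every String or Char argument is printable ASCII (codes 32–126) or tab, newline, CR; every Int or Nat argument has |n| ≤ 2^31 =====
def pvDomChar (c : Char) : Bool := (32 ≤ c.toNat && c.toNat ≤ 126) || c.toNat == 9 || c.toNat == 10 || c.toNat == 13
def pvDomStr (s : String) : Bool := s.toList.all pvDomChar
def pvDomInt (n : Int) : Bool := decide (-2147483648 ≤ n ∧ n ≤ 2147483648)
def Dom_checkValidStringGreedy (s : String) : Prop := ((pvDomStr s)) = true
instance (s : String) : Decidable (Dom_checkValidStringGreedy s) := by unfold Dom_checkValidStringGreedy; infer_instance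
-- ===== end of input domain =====

-- B replaces the single-pass two-counter greedy with the idiomatic two-pass check
-- (a forward scan where wildcards count as openers, a reversed scan where they count
-- as closers); same cost, different decomposition.

-- ===== PORT A =====
-- literal port of A's loop: state (cmin, cmax), clamp cmin at 0, early False on cmax < 0
def loopA : List Char → Int → Int → Bool
  | [], cmin, _ => cmin == 0
  | c :: rest, cmin, cmax =>
    let cmin' := if c = '(' then cmin + 1 else cmin - 1
    let cmax' := if c = '(' then cmax + 1 else if c = ')' then cmax - 1 else cmax + 1
    let cmin'' := if cmin' < 0 then 0 else cmin'
    if cmax' < 0 then false else loopA rest cmin'' cmax'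

def checkValidStringGreedy (s : String) : Bool := loopA s.toList 0 0

-- ===== PORT B =====
-- port of Source B's helper _scan(chars, close)
def scanB : List Char → Char → Int → Bool
  | [], _, _ => true
  | c :: rest, close, bal =>
    let bal' := if c = close then bal - 1 else bal + 1
    if bal' < 0 then false else scanB rest close bal'

def checkValidStringGreedy_alt (s : String) : Bool :=
  scanB s.toList ')' 0 && scanB s.toList.reverse '(' 0

-- ===== PRECONDITION & SPEC =====
def Spec_checkValidStringGreedy (s : String) (out : Bool) : Prop := out = checkValidStringGreedy_alt s
instance (s : String) (out : Bool) : Decidable (Spec_checkValidStringGreedy s out) := by unfold Spec_checkValidStringGreedy; infer_instance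

-- ===== CLAIM (what is proved, stated in full; the proofs are below) =====
def Claim_equal_checkValidStringGreedy : Prop := ∀ (s : String), Dom_checkValidStringGreedy s → Spec_checkValidStringGreedy s (checkValidStringGreedy s)

-- ===== LEMMAS AND PROOFS =====

-- the cmin component of A's loop on its own
def cminRun : List Char → Int → Int
  | [], m => m
  | c :: rest, m =>
    let m' := if c = '(' then m + 1 else m - 1
    cminRun rest (if m' < 0 then 0 else m')

-- sum of +1 per '(' and -1 per other char over a list
def dsum : List Char → Int
  | [] => 0
  | c :: rest => (if c = '(' then 1 else -1) + dsum rest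

-- max of dsum over the proper suffixes (including the empty one)
def tmax : List Char → Int
  | [] => 0
  | _ :: rest => max (dsum rest) (tmax rest)

-- min of (-dsum) over prefixes (including the empty one), for the backward scan
def mmin : List Char → Int
  | [] => 0
  | c :: rest => min 0 ((if c = '(' then -1 else 1) + mmin rest)

lemma mmin_nonpos (l : List Char) : mmin l ≤ 0 := by
  cases l <;> simp [mmin]

lemma tmax_nonneg (l : List Char) : 0 ≤ tmax l := by
  induction l with
  | nil => simp [tmax]
  | cons c rest ih => simp [tmax]; omega

-- A's loop decomposes into B's forward scan and the clamped cmin run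
lemma loopA_decomp (l : List Char) : ∀ cmin cmax : Int,
    loopA l cmin cmax = (scanB l ')' cmax && (cminRun l cmin == 0)) := by
  induction l with
  | nil => intro cmin cmax; simp [loopA, scanB, cminRun]
  | cons c rest ih =>
    intro cmin cmax
    by_cases h1 : c = '('
    · have h2 : ¬ c = ')' := by simp [h1]
      simp only [loopA, cminRun, scanB, h1, ite_true]
      split_ifs with ha hb hc <;> simp_all
    · by_cases h2 : c = ')'
      · simp only [loopA, cminRun, scanB, h2, ite_true]
        split_ifs with ha hb hc <;> simp_all
      · simp only [loopA, cminRun, scanB, h1, h2, ite_false]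
        split_ifs with ha hb hc <;> simp_all

-- the clamped run equals max of (m + total sum) and the suffix maximum
lemma cminRun_eq (l : List Char) : ∀ m : Int, 0 ≤ m →
    cminRun l m = max (m + dsum l) (tmax l) := by
  induction l with
  | nil => intro m hm; simp [cminRun, dsum, tmax]; omega
  | cons c rest ih =>
    intro m hm
    have ht := tmax_nonneg rest
    by_cases h1 : c = '('
    · simp [cminRun, dsum, tmax, h1]
      rw [ih _ (by omega)]
      split_ifs <;> omega
    · simp [cminRun, dsum, tmax, h1]
      split_ifs with h
      · rw [ih 0 le_rfl]; omega
      · rw [ih _ (by omega)]; omega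

-- the scan succeeds iff the prefix minimum keeps bal nonnegative
lemma scanB_eq (l : List Char) : ∀ bal : Int, 0 ≤ bal →
    scanB l '(' bal = decide (0 ≤ bal + mmin l) := by
  induction l with
  | nil => intro bal h; simp [scanB, mmin, h]
  | cons c rest ih =>
    intro bal h
    have hnp := mmin_nonpos rest
    by_cases h1 : c = '('
    · simp only [scanB, mmin, h1, ite_true]
      split_ifs with h2
      · have hx : ¬ (0 ≤ bal + min 0 (-1 + mmin rest)) := by omega
        simp [hx]
      · rw [ih _ (by omega)]
        simp only [decide_eq_decide]; omega
    · simp only [scanB, mmin, h1, ite_false]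
      split_ifs with h2
      · omega
      · rw [ih _ (by omega)]
        simp only [decide_eq_decide]; omega

lemma mmin_append (u : List Char) (c : Char) :
    mmin (u ++ [c]) = min (mmin u) (-(dsum u) + (if c = '(' then -1 else 1)) := by
  induction u with
  | nil => simp [mmin, dsum]
  | cons x u' ih => simp [mmin, dsum, ih]; split_ifs <;> omega

lemma mmin_reverse (l : List Char) :
    mmin l.reverse = min (-(dsum l)) (-(tmax l)) := by
  induction l with
  | nil => simp [mmin, dsum, tmax]
  | cons c rest ih =>
    have : dsum rest.reverse = dsum rest := by
      clear ih
      induction rest with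
      | nil => rfl
      | cons x r ihr =>
        have : ∀ u (c' : Char), dsum (u ++ [c']) = dsum u + (if c' = '(' then 1 else -1) := by
          intro u c'; induction u with
          | nil => simp [dsum]
          | cons y u' ihu => simp [dsum, ihu]; ring
        simp [dsum, this, ihr]; ring
    simp only [List.reverse_cons, mmin_append, ih, this, dsum, tmax]
    split_ifs <;> omega

-- ===== VERDICT (by name: the statement is the Claim_ definition above) =====
theorem checkValidStringGreedy_spec : Claim_equal_checkValidStringGreedy := by
  intro s _
  show checkValidStringGreedy s = checkValidStringGreedy_alt s
  unfold checkValidStringGreedy checkValidStringGreedy_alt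
  rw [loopA_decomp, cminRun_eq _ 0 le_rfl, scanB_eq _ 0 le_rfl, mmin_reverse]
  have ht := tmax_nonneg s.toList
  congr 1
  apply Bool.eq_iff_iff.mpr
  simp only [beq_iff_eq, decide_eq_true_eq]
  omega
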